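-- pv_equiv track=rewrite | github.com/appacademy/prep-work | coding-test-1/practice-problems/solutions-python/07-most-letters.py | nearby_az
-- ===== SOURCE A (Python) =====
-- def nearby_az(string):
--     string = list(string)
--
--     if "a" not in string:
--         return False
--
--     else:
--         az_found = False
--         for index, letter in enumerate(string):
--             if letter == "a" and "z" in string[index:index+4]:
--                 az_found = True
--         return az_found
-- ===== SOURCE B (Python) =====
-- def nearby_az(string):
--     last_a = -10
--     for j, c in enumerate(string):
--         if c == 'z' and j - last_a <= 3:
--             return True
--         if c == 'a':
--             last_a = j
--     return False
-- ===== Notes on version B (the rewrite author's own statement) =====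
-- stated objective: simpler
-- what changed: Instead of scanning every position and slicing a 4-char forward window at each occurrence of the letter a, B makes one early-exit pass that maintains only the index of the most recently seen a and returns True at the first z within distance 3 of it.
import Mathlib
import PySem

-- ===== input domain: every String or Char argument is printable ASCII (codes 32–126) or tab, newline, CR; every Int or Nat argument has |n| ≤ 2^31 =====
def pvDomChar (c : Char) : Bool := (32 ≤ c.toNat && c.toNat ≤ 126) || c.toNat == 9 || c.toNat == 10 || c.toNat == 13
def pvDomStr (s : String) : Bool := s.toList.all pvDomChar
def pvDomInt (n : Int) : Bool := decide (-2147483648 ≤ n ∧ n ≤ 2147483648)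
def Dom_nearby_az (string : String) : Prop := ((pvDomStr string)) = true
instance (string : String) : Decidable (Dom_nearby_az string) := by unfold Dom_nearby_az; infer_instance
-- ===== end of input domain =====

-- B replaces A's per-'a' forward window slices by one early-exit pass that keeps only the
-- index of the most recent 'a' (objective: simpler).

-- ===== PORT A =====
def nearby_az (string : String) : Bool :=
  let l := string.toList
  if ¬ ('a' ∈ l) then false
  else
    (PySem.List.enumerate l 0).foldl
      (fun az_found p =>
        if p.2 == 'a' && (PySem.List.slice l (some p.1) (some (p.1 + 4))).contains 'z' then
          true
        else az_found)
      false

-- ===== PORT B =====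
def nearbyLoopB : List Char → Int → Int → Bool
  | [], _, _ => false
  | c :: rest, j, last_a =>
    if c == 'z' && decide (j - last_a ≤ 3) then true
    else nearbyLoopB rest (j + 1) (if c == 'a' then j else last_a)

def nearby_az_alt (string : String) : Bool :=
  nearbyLoopB string.toList 0 (-10)

-- ===== PRECONDITION & SPEC =====
def Spec_nearby_az (string : String) (out : Bool) : Prop := out = nearby_az_alt string
instance (string : String) (out : Bool) : Decidable (Spec_nearby_az string out) := by unfold Spec_nearby_az; infer_instance

-- ===== CLAIM (what is proved, stated in full; the proofs are below) =====
def Claim_equal_nearby_az : Prop := ∀ (string : String), Dom_nearby_az string → Spec_nearby_az string (nearby_az string)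

-- ===== LEMMAS AND PROOFS =====

-- the common characterisation: an 'a' at m, a 'z' at k, 0 < k - m ≤ 3
def GoodAZ (l : List Char) : Prop :=
  ∃ m k : Nat, m < k ∧ k ≤ m + 3 ∧ l[m]? = some 'a' ∧ l[k]? = some 'z'

theorem foldl_if_true (Q : Int × Char → Bool) (xs : List (Int × Char)) (b : Bool) :
    xs.foldl (fun acc p => if Q p then true else acc) b
      = (b || xs.any Q) := by
  induction xs generalizing b with
  | nil => simp
  | cons x xs ih =>
    simp only [List.foldl_cons, List.any_cons, ih]
    by_cases h : Q x <;> simp [h]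

theorem mem_take_drop_iff (l : List Char) (k : Nat) (x : Char) :
    x ∈ (l.drop k).take 4 ↔ ∃ j : Nat, k ≤ j ∧ j < k + 4 ∧ l[j]? = some x := by
  rw [List.mem_iff_getElem?]
  constructor
  · rintro ⟨d, hd⟩
    rw [List.getElem?_take] at hd
    split at hd
    · refine ⟨k + d, by omega, by omega, ?_⟩
      rwa [List.getElem?_drop] at hd
    · simp at hd
  · rintro ⟨j, h1, h2, hj⟩
    refine ⟨j - k, ?_⟩
    rw [List.getElem?_take, if_pos (by omega), List.getElem?_drop]
    have : k + (j - k) = j := by omega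
    rwa [this]

theorem nearby_az_iff (s : String) : nearby_az s = true ↔ GoodAZ s.toList := by
  set l := s.toList with hl
  unfold nearby_az
  rw [← hl]
  by_cases ha : 'a' ∈ l
  · simp only [ha, not_true_eq_false, if_false]
    rw [foldl_if_true, Bool.false_or, List.any_eq_true]
    constructor
    · rintro ⟨⟨i, c⟩, hmem, hQ⟩
      rw [PySem.List.mem_enumerate_iff] at hmem
      obtain ⟨k, hk, hpk⟩ := hmem
      obtain ⟨hi, hc⟩ := Prod.mk.injEq .. ▸ hpk
      simp only [Bool.and_eq_true, beq_iff_eq] at hQ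
      obtain ⟨hca, hz⟩ := hQ
      subst hi hc
      have h4 : ((k : Nat) : Int) + 4 = ((k + 4 : Nat) : Int) := by push_cast; ring
      rw [zero_add] at hz
      rw [h4, PySem.List.slice_natCast, List.contains_iff_mem] at hz
      have h44 : k + 4 - k = 4 := by omega
      rw [h44, mem_take_drop_iff] at hz
      · obtain ⟨j, hkj, hj4, hjz⟩ := hz
        have hka : l[k]? = some 'a' := by
          rw [List.getElem?_eq_getElem hk, hca]
        have hne : k ≠ j := by
          intro h; rw [← h, hka] at hjz; exact absurd (Option.some.injEq .. ▸ hjz) (by decide)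
        exact ⟨k, j, by omega, by omega, hka, hjz⟩
    · rintro ⟨m, k, hmk, hk3, hma, hkz⟩
      have hm : m < l.length := (List.getElem?_eq_some_iff.mp hma).1
      refine ⟨((m : Int), 'a'), ?_, ?_⟩
      · rw [PySem.List.mem_enumerate_iff]
        exact ⟨m, hm, by
          rw [zero_add]
          have := (List.getElem?_eq_some_iff.mp hma).2
          simp [this]⟩
      · simp only [Bool.and_eq_true, beq_self_eq_true, true_and]
        have h4 : (m : Int) + 4 = ((m + 4 : Nat) : Int) := by push_cast; ring
        rw [h4, PySem.List.slice_natCast, List.contains_iff_mem]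
        have h44 : m + 4 - m = 4 := by omega
        rw [h44, mem_take_drop_iff]
        exact ⟨k, by omega, by omega, hkz⟩
  · simp only [ha, not_false_eq_true, if_true]
    constructor
    · intro h; cases h
    · rintro ⟨m, k, _, _, hma, _⟩
      exact absurd (List.mem_of_getElem? hma) ha

theorem nearbyLoopB_iff (rest : List Char) (j la : Int) (hla : la ≤ j) :
    nearbyLoopB rest j la = true ↔
      ∃ k : Nat, rest[k]? = some 'z' ∧
        ((j + k) - la ≤ 3 ∨ ∃ m : Nat, m < k ∧ rest[m]? = some 'a' ∧ (k : Int) - m ≤ 3) := by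
  induction rest generalizing j la with
  | nil => simp [nearbyLoopB]
  | cons c rest ih =>
    unfold nearbyLoopB
    by_cases hz : c = 'z' ∧ j - la ≤ 3
    · rw [if_pos (by simp [hz.1, hz.2])]
      simp only [true_iff]
      exact ⟨0, by simp [hz.1], Or.inl (by have := hz.2; push_cast; omega)⟩
    · rw [if_neg (by
        simp only [Bool.and_eq_true, beq_iff_eq, decide_eq_true_eq]
        exact fun h => hz ⟨h.1, h.2⟩)]
      rw [ih (j + 1) _ (by split <;> omega)]
      constructor
      · rintro ⟨k, hkz, hdisj⟩
        refine ⟨k + 1, by simpa using hkz, ?_⟩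
        rcases hdisj with hleft | ⟨m, hmk, hma, hm3⟩
        · by_cases hca : c = 'a'
          · rw [if_pos (by simp [hca])] at hleft
            exact Or.inr ⟨0, by omega, by simp [hca], by push_cast at hleft ⊢; omega⟩
          · rw [if_neg (by simp [hca])] at hleft
            exact Or.inl (by push_cast at hleft ⊢; omega)
        · exact Or.inr ⟨m + 1, by omega, by simpa using hma, by push_cast at hm3 ⊢; omega⟩
      · rintro ⟨k, hkz, hdisj⟩
        cases k with
        | zero =>
          exfalso
          simp only [List.getElem?_cons_zero, Option.some.injEq] at hkz
          rcases hdisj with hleft | ⟨m, hm0, _, _⟩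
          · exact hz ⟨hkz, by push_cast at hleft; omega⟩
          · omega
        | succ k' =>
          simp only [List.getElem?_cons_succ] at hkz
          refine ⟨k', hkz, ?_⟩
          rcases hdisj with hleft | ⟨m, hmk, hma, hm3⟩
          · push_cast at hleft
            by_cases hca : c = 'a'
            · rw [if_pos (by simp [hca])]
              exact Or.inl (by omega)
            · rw [if_neg (by simp [hca])]
              exact Or.inl (by omega)
          · cases m with
            | zero =>
              simp only [List.getElem?_cons_zero, Option.some.injEq] at hma
              rw [if_pos (by simp [hma])]
              exact Or.inl (by push_cast at hm3 ⊢; omega)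
            | succ m' =>
              simp only [List.getElem?_cons_succ] at hma
              exact Or.inr ⟨m', by omega, hma, by push_cast at hm3 ⊢; omega⟩

theorem nearby_az_alt_iff (s : String) : nearby_az_alt s = true ↔ GoodAZ s.toList := by
  unfold nearby_az_alt
  rw [nearbyLoopB_iff _ 0 (-10) (by omega)]
  constructor
  · rintro ⟨k, hkz, hdisj⟩
    rcases hdisj with hleft | ⟨m, hmk, hma, hm3⟩
    · exfalso; omega
    · exact ⟨m, k, hmk, by omega, hma, hkz⟩
  · rintro ⟨m, k, hmk, hk3, hma, hkz⟩
    exact ⟨k, hkz, Or.inr ⟨m, hmk, hma, by omega⟩⟩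

-- ===== VERDICT (by name: the statement is the Claim_ definition above) =====
theorem nearby_az_spec : Claim_equal_nearby_az := by
  intro s _
  unfold Spec_nearby_az
  rw [Bool.eq_iff_iff, nearby_az_iff, nearby_az_alt_iff]
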